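-- pv_equiv track=rewrite | github.com/UniVe-NeDS-Lab/5G-backhaul-OR2AN2G | manage_graphs.py | compute_tree_size
-- ===== SOURCE A (Python) =====
-- def compute_tree_size(max_diam, max_out_deg, decr=0):
--     tree_size = {}
--     if max_out_deg < 0:
--         max_out_deg = -max_out_deg
--         decr = 1
--     for j in range(2, max_out_deg+1):
--         for i in range(1, max_diam+1):
--             nodes = 1
--             level_nodes = 1
--             degree = j
--             for r in range(1, i+1):
--                 if not degree:
--                     break
--                 level_nodes = level_nodes*degree
--                 degree -= decr
--                 nodes += level_nodes
--             tree_size[(i,j)] = nodes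
--     return tree_size
-- ===== SOURCE B (Python) =====
-- def compute_tree_size(max_diam, max_out_deg, decr=0):
--     # Staged passes per branching factor: build the degree sequence once,
--     # prefix-multiply it into level sizes, prefix-sum into cumulative counts,
--     # then read each diameter's answer off the table (constant after the break point).
--     if max_out_deg < 0:
--         max_out_deg = -max_out_deg
--         decr = 1
--     out = {}
--     for j in range(2, max_out_deg + 1):
--         degs = []
--         d = j
--         while len(degs) < max_diam and d:
--             degs.append(d)
--             d -= decr
--         levels = []
--         p = 1
--         for d in degs:
--             p *= d
--             levels.append(p)
--         cum = []
--         s = 1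
--         for p in levels:
--             s += p
--             cum.append(s)
--         for i in range(1, max_diam + 1):
--             out[(i, j)] = cum[i - 1] if i <= len(cum) else cum[-1]
--     return out
-- ===== Notes on version B (the rewrite author's own statement) =====
-- stated objective: faster
-- what changed: Instead of recomputing the level-product loop from scratch for every diameter i, B builds per branching factor a staged pipeline - the degree sequence until it hits 0, its prefix products (level sizes), their prefix sums (cumulative node counts) - and then answers every diameter by a table lookup that stays constant past the break point.
import Mathlib
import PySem

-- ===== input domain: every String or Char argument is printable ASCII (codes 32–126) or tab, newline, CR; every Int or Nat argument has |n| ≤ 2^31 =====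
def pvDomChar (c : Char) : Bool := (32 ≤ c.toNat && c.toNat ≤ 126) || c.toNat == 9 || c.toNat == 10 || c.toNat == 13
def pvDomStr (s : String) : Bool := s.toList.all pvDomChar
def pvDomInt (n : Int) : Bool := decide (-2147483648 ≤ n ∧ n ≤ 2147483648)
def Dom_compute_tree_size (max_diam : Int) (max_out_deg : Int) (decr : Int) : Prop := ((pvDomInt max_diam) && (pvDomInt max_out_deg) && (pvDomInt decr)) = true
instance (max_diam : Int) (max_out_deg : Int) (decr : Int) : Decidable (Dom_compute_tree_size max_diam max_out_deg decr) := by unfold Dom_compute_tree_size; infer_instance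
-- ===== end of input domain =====

-- B replaces A's per-diameter recomputation of the whole level-product loop by staged passes per
-- branching factor: degree sequence, prefix products, prefix sums, then table lookups (objective: faster).
-- Python's dict keys (i, j) are pairwise distinct here, so each dict assignment is an append in
-- insertion order; the entry ((i, j), nodes) is flattened to (i, j, nodes) per the type convention.

-- ===== PORT A =====
-- inner loop 'for r in range(1, i+1): if not degree: break; …' of A
def pvA_inner (decr : Int) : List Int → Int × Int × Int → Int × Int × Int
  | [], st => st
  | _ :: rs, (nodes, level_nodes, degree) =>
      if degree == 0 then (nodes, level_nodes, degree)   -- break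
      else
        let level_nodes' := level_nodes * degree
        let degree' := degree - decr
        pvA_inner decr rs (nodes + level_nodes', level_nodes', degree')

-- the two nested for-loops of A (after the sign normalisation of max_out_deg/decr)
def pvA_main (max_diam : Int) (max_out_deg : Int) (decr : Int) : List (Int × Int × Int) :=
  (PySem.List.pyRange 2 (max_out_deg + 1) 1).foldl (fun ts j =>
    (PySem.List.pyRange 1 (max_diam + 1) 1).foldl (fun ts i =>
      ts ++ [(i, j, (pvA_inner decr (PySem.List.pyRange 1 (i + 1) 1) (1, 1, j)).1)]) ts) []

def compute_tree_size (max_diam : Int) (max_out_deg : Int) (decr : Int) : List (Int × Int × Int) :=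
  if max_out_deg < 0 then pvA_main max_diam (-max_out_deg) 1
  else pvA_main max_diam max_out_deg decr

-- ===== PORT B =====
-- 'while len(degs) < max_diam and d: degs.append(d); d -= decr' — fuel = max_diam - len(degs)
def pvB_degs (decr : Int) : Nat → Int → List Int
  | 0, _ => []
  | n + 1, d => if d == 0 then [] else d :: pvB_degs decr n (d - decr)

-- 'p = 1; for d in degs: p *= d; levels.append(p)' — prefix products
def pvB_prefixMul (p : Int) : List Int → List Int
  | [] => []
  | d :: ds => p * d :: pvB_prefixMul (p * d) ds

-- 's = 1; for p in levels: s += p; cum.append(s)' — prefix sums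
def pvB_prefixAdd (s : Int) : List Int → List Int
  | [] => []
  | p :: ps => (s + p) :: pvB_prefixAdd (s + p) ps

-- one row for a fixed j: the table cum, then 'cum[i-1] if i <= len(cum) else cum[-1]' per diameter
def pvB_row (max_diam : Int) (decr : Int) (j : Int) : List (Int × Int × Int) :=
  let cum := pvB_prefixAdd 1 (pvB_prefixMul 1 (pvB_degs decr max_diam.toNat j))
  (PySem.List.pyRange 1 (max_diam + 1) 1).map (fun i =>
    (i, j, if i ≤ (cum.length : Int) then PySem.List.pyGetD cum (i - 1) 0
           else PySem.List.pyGetD cum (-1) 0))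

def pvB_main (max_diam : Int) (max_out_deg : Int) (decr : Int) : List (Int × Int × Int) :=
  (PySem.List.pyRange 2 (max_out_deg + 1) 1).foldl (fun ts j => ts ++ pvB_row max_diam decr j) []

def compute_tree_size_alt (max_diam : Int) (max_out_deg : Int) (decr : Int) : List (Int × Int × Int) :=
  if max_out_deg < 0 then pvB_main max_diam (-max_out_deg) 1
  else pvB_main max_diam max_out_deg decr

-- ===== PRECONDITION & SPEC =====
def Spec_compute_tree_size (max_diam : Int) (max_out_deg : Int) (decr : Int) (out : List (Int × Int × Int)) : Prop := out = compute_tree_size_alt max_diam max_out_deg decr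
instance (max_diam : Int) (max_out_deg : Int) (decr : Int) (out : List (Int × Int × Int)) : Decidable (Spec_compute_tree_size max_diam max_out_deg decr out) := by unfold Spec_compute_tree_size; infer_instance

-- ===== CLAIM (what is proved, stated in full; the proofs are below) =====
def Claim_equal_compute_tree_size : Prop := ∀ (max_diam : Int) (max_out_deg : Int) (decr : Int), Dom_compute_tree_size max_diam max_out_deg decr → Spec_compute_tree_size max_diam max_out_deg decr (compute_tree_size max_diam max_out_deg decr)

-- ===== LEMMAS AND PROOFS =====

-- one step of A's loop body seen as a state transition
def pvStep (decr : Int) (st : Int × Int × Int) : Int × Int × Int :=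
  if st.2.2 == 0 then st else (st.1 + st.2.1 * st.2.2, st.2.1 * st.2.2, st.2.2 - decr)

theorem pvA_inner_eq_iter (decr : Int) (rs : List Int) (st : Int × Int × Int) :
    pvA_inner decr rs st = (pvStep decr)^[rs.length] st := by
  induction rs generalizing st with
  | nil => simp [pvA_inner]
  | cons r rs ih =>
    obtain ⟨n, l, d⟩ := st
    by_cases hd : d = 0
    · subst hd
      have hfix : pvStep decr (n, l, 0) = (n, l, 0) := by simp [pvStep]
      simp [pvA_inner, Function.iterate_fixed hfix]
    · simp only [pvA_inner, List.length_cons, Function.iterate_succ_apply]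
      rw [ih]
      simp [pvStep, hd]

-- length of the degree sequence is at most the fuel
theorem pvB_degs_len_le (decr : Int) (n : Nat) (d : Int) :
    (pvB_degs decr n d).length ≤ n := by
  induction n generalizing d with
  | zero => simp [pvB_degs]
  | succ m ih =>
    by_cases hd : d = 0
    · simp [pvB_degs, hd]
    · simp only [pvB_degs, beq_iff_eq, if_neg hd, List.length_cons]
      exact Nat.succ_le_succ (ih _)

-- if the while-loop stopped before exhausting the fuel, the degree component reached 0,
-- so pvStep is a fixpoint from step (len degs) on
theorem pvB_degs_stop (decr : Int) (n : Nat) (st : Int × Int × Int)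
    (h : (pvB_degs decr n st.2.2).length < n) :
    ((pvStep decr)^[(pvB_degs decr n st.2.2).length] st).2.2 = 0 := by
  induction n generalizing st with
  | zero => omega
  | succ m ih =>
    by_cases hd : st.2.2 = 0
    · simp [pvB_degs, hd]
    · obtain ⟨a, b, d⟩ := st
      simp only at hd
      simp only [pvB_degs, beq_iff_eq, if_neg hd, List.length_cons,
        Function.iterate_succ_apply] at h ⊢
      have hstep : pvStep decr (a, b, d) = (a + b * d, b * d, d - decr) := by
        simp [pvStep, hd]
      rw [hstep]
      have := ih (a + b * d, b * d, d - decr) (by simpa using Nat.lt_of_succ_lt_succ h)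
      simpa using this

-- the staged passes compute exactly the trajectory of A's state transition
theorem pvB_cum_eq (decr : Int) (n : Nat) (st : Int × Int × Int) (hd : st.2.2 ≠ 0 ∨ n = 0) :
    pvB_prefixAdd st.1 (pvB_prefixMul st.2.1 (pvB_degs decr n st.2.2))
      = (List.range (pvB_degs decr n st.2.2).length).map
          (fun k => ((pvStep decr)^[k + 1] st).1) := by
  induction n generalizing st with
  | zero => simp [pvB_degs, pvB_prefixMul, pvB_prefixAdd]
  | succ m ih =>
    obtain ⟨a, b, d⟩ := st
    rcases hd with hd | hd
    · simp only at hd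
      simp only [pvB_degs, beq_iff_eq, if_neg hd, pvB_prefixMul, pvB_prefixAdd,
        List.length_cons]
      have hstep : pvStep decr (a, b, d) = (a + b * d, b * d, d - decr) := by
        simp [pvStep, hd]
      rw [List.range_succ_eq_map]
      simp only [List.map_cons, List.map_map]
      refine List.cons_eq_cons.mpr ⟨?_, ?_⟩
      · simp [hstep]
      · by_cases hdm : d - decr = 0
        · -- degree reached 0: degs for the tail is [], both sides are []
          by_cases hm : m = 0
          · subst hm; simp [pvB_degs, pvB_prefixMul, pvB_prefixAdd]
          · cases m with
            | zero => simp at hm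
            | succ m' =>
              simp [pvB_degs, hdm, pvB_prefixMul, pvB_prefixAdd]
        · have := ih (a + b * d, b * d, d - decr) (Or.inl (by simpa using hdm))
          simp only at this
          rw [this]
          apply List.map_congr_left
          intro k _
          simp [Function.iterate_succ_apply, hstep, Function.comp]
    · omega

-- A's inner-loop value at diameter i equals B's table entry
theorem pv_entry_eq (max_diam decr j i : Int) (hj : j ≠ 0) (hi1 : 1 ≤ i) (hi2 : i ≤ max_diam) :
    (pvA_inner decr (PySem.List.pyRange 1 (i + 1) 1) (1, 1, j)).1
      = (let cum := pvB_prefixAdd 1 (pvB_prefixMul 1 (pvB_degs decr max_diam.toNat j));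
         if i ≤ (cum.length : Int) then PySem.List.pyGetD cum (i - 1) 0
         else PySem.List.pyGetD cum (-1) 0) := by
  set st : Int × Int × Int := (1, 1, j) with hst
  have hstd : st.2.2 = j := rfl
  have hcum := pvB_cum_eq decr max_diam.toNat st (Or.inl (by simp [hst, hj]))
  set m := (pvB_degs decr max_diam.toNat st.2.2).length with hm
  have hlen : (PySem.List.pyRange 1 (i + 1) 1).length = i.toNat := by
    rw [PySem.List.length_pyRange_one]; omega
  rw [pvA_inner_eq_iter, hlen]
  simp only
  rw [hcum]
  have hculen : ((List.range m).map (fun k => ((pvStep decr)^[k + 1] st).1)).length = m := by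
    simp
  by_cases hle : i ≤ (m : Int)
  · rw [if_pos (by rw [hculen]; exact_mod_cast hle)]
    have hk : (i - 1).toNat < m := by omega
    rw [PySem.List.pyGetD_eq_getElem _ 0 (by omega)
      (by simp only [List.length_map, List.length_range]; omega)]
    simp only [List.getElem_map, List.getElem_range]
    have hidx : (i - 1).toNat + 1 = i.toNat := by omega
    rw [hidx]
  · rw [if_neg (by rw [hculen]; exact_mod_cast hle)]
    have hmlt : m < max_diam.toNat := by
      have h1 : (m : Int) < i := by omega
      have := pvB_degs_len_le decr max_diam.toNat st.2.2
      rw [← hm] at this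
      omega
    have hfix0 : ((pvStep decr)^[m] st).2.2 = 0 := pvB_degs_stop decr max_diam.toNat st hmlt
    have hfix : pvStep decr ((pvStep decr)^[m] st) = (pvStep decr)^[m] st := by
      have hb : (((pvStep decr)^[m] st).2.2 == 0) = true := by simp [hfix0]
      simp [pvStep, hb]
    have hiter : ∀ k : Nat, m ≤ k → (pvStep decr)^[k] st = (pvStep decr)^[m] st := by
      intro k hk
      obtain ⟨e, rfl⟩ := Nat.exists_eq_add_of_le hk
      rw [Nat.add_comm, Function.iterate_add_apply, Function.iterate_fixed hfix]
    have hm1 : 1 ≤ m := by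
      -- max_diam ≥ 1 and j ≠ 0, so the while loop ran at least once
      have hfuel : 1 ≤ max_diam.toNat := by omega
      cases hn : max_diam.toNat with
      | zero => omega
      | succ n' =>
        rw [hm, hstd]
        simp [pvB_degs, hj, hn]
    have hne : (List.range m).map (fun k => ((pvStep decr)^[k + 1] st).1) ≠ [] := by
      simp [List.map_eq_nil_iff, List.range_eq_nil]; omega
    rw [PySem.List.pyGetD_neg_one _ _ hne]
    rw [List.getLast_eq_getElem]
    simp only [List.getElem_map, List.getElem_range, hculen]
    rw [hiter (m - 1 + 1) (by omega), hiter i.toNat (by omega)]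

-- rows agree; A's inner foldl-append is the map that B builds directly
theorem pv_row_eq (max_diam decr j : Int) (hj : j ≠ 0) (acc : List (Int × Int × Int)) :
    (PySem.List.pyRange 1 (max_diam + 1) 1).foldl (fun ts i =>
      ts ++ [(i, j, (pvA_inner decr (PySem.List.pyRange 1 (i + 1) 1) (1, 1, j)).1)]) acc
      = acc ++ pvB_row max_diam decr j := by
  rw [PySem.List.foldl_append_singleton_eq_map]
  unfold pvB_row
  congr 1
  apply List.map_congr_left
  intro i hi
  rw [PySem.List.mem_pyRange_one] at hi
  rw [pv_entry_eq max_diam decr j i hj hi.1 (by omega)]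

theorem pv_main_eq (max_diam max_out_deg decr : Int) :
    pvA_main max_diam max_out_deg decr = pvB_main max_diam max_out_deg decr := by
  unfold pvA_main pvB_main
  apply List.foldl_ext
  intro acc j hjmem
  rw [PySem.List.mem_pyRange_one] at hjmem
  exact pv_row_eq max_diam decr j (by omega) acc

-- ===== VERDICT (by name: the statement is the Claim_ definition above) =====
theorem compute_tree_size_spec : Claim_equal_compute_tree_size := by
  intro max_diam max_out_deg decr _
  unfold Spec_compute_tree_size compute_tree_size compute_tree_size_alt
  split <;> exact pv_main_eq _ _ _
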